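-- pv_equiv track=rewrite | github.com/c04nh/CosPro-2 | 3-07.py | solution
-- ===== SOURCE A (Python) =====
-- def solution(num_apple, num_carrot, k):
-- 	answer = 0
--
-- 	if num_apple < (3 * num_carrot):
-- 		answer = num_apple // 3
-- 	else:
-- 		answer = num_carrot
--
-- 	num_apple -= answer * 3
-- 	num_carrot -= answer
--
-- 	i = 0
-- 	k = k - (num_apple + num_carrot)
--
-- 	while k > 0:
-- 		if i % 4 == 0:
-- 			answer = answer - 1
-- 		i = i + 1
-- 		k = k - 1
--
-- 	return answer
-- ===== SOURCE B (Python) =====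
-- def solution(num_apple, num_carrot, k):
--     if num_apple < 3 * num_carrot:
--         answer = num_apple // 3
--     else:
--         answer = num_carrot
--     rem = k - (num_apple - 3 * answer) - (num_carrot - answer)
--     if rem > 0:
--         answer -= (rem + 3) // 4
--     return answer
-- ===== Notes on version B (the rewrite author's own statement) =====
-- stated objective: faster
-- what changed: Replaced A's counting while-loop (one iteration per unit of k) with a closed-form ceiling division: the loop decrements answer once every 4 iterations, so answer -= (rem+3)//4 when rem > 0.
import Mathlib
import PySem

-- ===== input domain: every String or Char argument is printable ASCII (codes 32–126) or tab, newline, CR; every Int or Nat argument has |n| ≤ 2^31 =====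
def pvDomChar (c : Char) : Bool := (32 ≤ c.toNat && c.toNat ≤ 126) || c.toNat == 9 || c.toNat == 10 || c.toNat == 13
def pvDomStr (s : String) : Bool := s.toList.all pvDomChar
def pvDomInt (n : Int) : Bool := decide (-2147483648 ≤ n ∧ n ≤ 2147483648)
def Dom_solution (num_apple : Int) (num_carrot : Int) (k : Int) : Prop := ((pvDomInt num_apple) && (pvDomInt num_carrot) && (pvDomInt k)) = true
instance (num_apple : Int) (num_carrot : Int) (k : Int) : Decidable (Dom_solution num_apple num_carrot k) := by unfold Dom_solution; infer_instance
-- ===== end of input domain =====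

-- B replaces A's O(k) counting while-loop with a closed-form ceiling division (objective: faster, asymptotic).


-- ===== PORT A =====
-- the while loop of A, state (answer, i, k); decreases k by 1 each iteration
def solutionLoop (answer : Int) (i : Int) (k : Int) : Int :=
  if 0 < k then
    solutionLoop (if PySem.Int.mod i 4 = 0 then answer - 1 else answer) (i + 1) (k - 1)
  else answer
termination_by k.toNat
decreasing_by omega

def solution (num_apple : Int) (num_carrot : Int) (k : Int) : Int :=
  let answer : Int := if num_apple < 3 * num_carrot then PySem.Int.floordiv num_apple 3 else num_carrot
  let num_apple := num_apple - answer * 3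
  let num_carrot := num_carrot - answer
  let k := k - (num_apple + num_carrot)
  solutionLoop answer 0 k

-- ===== PORT B =====
def solution_alt (num_apple : Int) (num_carrot : Int) (k : Int) : Int :=
  let answer : Int := if num_apple < 3 * num_carrot then PySem.Int.floordiv num_apple 3 else num_carrot
  let rem := k - (num_apple - 3 * answer) - (num_carrot - answer)
  if 0 < rem then answer - PySem.Int.floordiv (rem + 3) 4 else answer

-- ===== PRECONDITION & SPEC =====
def Spec_solution (num_apple : Int) (num_carrot : Int) (k : Int) (out : Int) : Prop := out = solution_alt num_apple num_carrot k
instance (num_apple : Int) (num_carrot : Int) (k : Int) (out : Int) : Decidable (Spec_solution num_apple num_carrot k out) := by unfold Spec_solution; infer_instance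

-- ===== CLAIM (what is proved, stated in full; the proofs are below) =====
def Claim_equal_solution : Prop := ∀ (num_apple : Int) (num_carrot : Int) (k : Int), Dom_solution num_apple num_carrot k → Spec_solution num_apple num_carrot k (solution num_apple num_carrot k)

-- ===== LEMMAS AND PROOFS =====

-- The loop subtracts, from answer, the number of multiples of 4 in [i, i+k).
lemma solutionLoop_eq (n : Nat) : ∀ (k i answer : Int), k.toNat = n → 0 ≤ i →
    solutionLoop answer i k = answer - (if 0 < k then (i + k + 3) / 4 - (i + 3) / 4 else 0) := by
  induction n with
  | zero =>
    intro k i answer hk hi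
    rw [solutionLoop]
    have : ¬ 0 < k := by omega
    simp [this]
  | succ m ih =>
    intro k i answer hk hi
    rw [solutionLoop]
    have hkpos : 0 < k := by omega
    simp only [hkpos, if_pos]
    rw [ih (k - 1) (i + 1) _ (by omega) (by omega)]
    have hmod : PySem.Int.mod i 4 = i % 4 := PySem.Int.mod_eq_emod_of_pos (by omega)
    rw [hmod]
    by_cases h4 : i % 4 = 0 <;> simp only [h4, if_pos, ite_false] <;>
      by_cases hk1 : (0:Int) < k - 1 <;> simp only [hk1, ite_true, ite_false] <;> omega

theorem solution_spec : Claim_equal_solution := by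
  intro na nc k _
  unfold Spec_solution solution solution_alt
  simp only []
  set answer : Int := if na < 3 * nc then PySem.Int.floordiv na 3 else nc with hans
  have hfd : ∀ x : Int, PySem.Int.floordiv x 4 = x / 4 := fun x =>
    PySem.Int.floordiv_eq_ediv_of_pos (by omega)
  rw [solutionLoop_eq (k - (na - answer * 3 + (nc - answer))).toNat _ 0 answer rfl (by omega)]
  have harith : na - answer * 3 + (nc - answer) = (na - 3 * answer) + (nc - answer) := by ring
  set rem := k - (na - 3 * answer) - (nc - answer) with hrem
  have : k - (na - answer * 3 + (nc - answer)) = rem := by omega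
  rw [this]
  by_cases h : 0 < rem <;> simp only [h, ite_true, ite_false, hfd] <;> omega
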